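-- pv_equiv track=rewrite | github.com/nullwiz/emlvm | rpn.py | gen_valid_rpn
-- ===== SOURCE A (Python) =====
-- from typing import Iterator
--
-- def gen_valid_rpn(num_ops: int, leaves: list[str]) -> Iterator[tuple[str, ...]]:
--     """
--     Generate all syntactically valid RPN programs with exactly `num_ops`
--     E-operators and (num_ops + 1) leaf tokens chosen from `leaves`.
--
--     Total count = Catalan(num_ops) × |leaves|^(num_ops+1).
--
--     Uses backtracking with pruning on stack-depth bounds.
--     """
--     n_leaves_total = num_ops + 1
--     buf: list[str] = []
--
--     def _gen(depth: int, ops_left: int, leaves_left: int) -> Iterator[tuple[str, ...]]: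
--         # Pruning: can we still land on depth=1?
--         min_final = depth - ops_left        # apply all remaining E's
--         max_final = depth + leaves_left     # push all remaining leaves
--         if not (min_final <= 1 <= max_final):
--             return
--
--         if ops_left == 0 and leaves_left == 0:
--             if depth == 1:
--                 yield tuple(buf)
--             return
--
--         # Push a leaf
--         if leaves_left > 0:
--             for leaf in leaves:
--                 buf.append(leaf)
--                 yield from _gen(depth + 1, ops_left, leaves_left - 1)
--                 buf.pop()
--
--         # Apply E (requires depth ≥ 2)
--         if ops_left > 0 and depth >= 2:
--             buf.append("E")
--             yield from _gen(depth - 1, ops_left - 1, leaves_left)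
--             buf.pop()
--
--     yield from _gen(0, num_ops, n_leaves_total)
-- ===== SOURCE B (Python) =====
-- def _feasible(d, r):
--     # a partial program at stack depth d with r tokens still to place
--     # can still end at depth exactly 1
--     return d - 1 <= r and (r - d + 1) % 2 == 0
--
--
-- def gen_valid_rpn(num_ops, leaves):
--     """
--     Iterative breadth-first construction over token positions: a frontier of
--     (prefix, depth) pairs is extended one position at a time, pruned by an
--     exact depth/parity feasibility test (no recursion, no per-branch counters).
--     """
--     if num_ops < 0:
--         return
--     L = 2 * num_ops + 1
--     frontier = [((), 0)]
--     for i in range(L):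
--         r = L - 1 - i  # tokens still to place after this position
--         nxt = []
--         for prefix, d in frontier:
--             if _feasible(d + 1, r):
--                 for leaf in leaves:
--                     nxt.append((prefix + (leaf,), d + 1))
--             if d >= 2 and _feasible(d - 1, r):
--                 nxt.append((prefix + ("E",), d - 1))
--         frontier = nxt
--     for prefix, d in frontier:
--         if d == 1:
--             yield prefix
-- ===== Notes on version B (the rewrite author's own statement) =====
-- stated objective: alternative
-- what changed: A's recursive backtracking generator (depth/ops-left/leaves-left counters, shared mutable buffer) is replaced by an iterative breadth-first frontier over token positions, extended level by level and pruned with an exact depth/parity feasibility test; the enumeration order is identical. Pre_ excludes only inputs with nonempty leaves and num_ops > 490, where CPython's A raises RecursionError (measured boundary num_ops = 498 on this interpreter, 490 leaves a safety margin; in that margin the enumeration has Catalan(num_ops) elements, so neither program can be evaluated to completion anyway).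
import Mathlib
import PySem

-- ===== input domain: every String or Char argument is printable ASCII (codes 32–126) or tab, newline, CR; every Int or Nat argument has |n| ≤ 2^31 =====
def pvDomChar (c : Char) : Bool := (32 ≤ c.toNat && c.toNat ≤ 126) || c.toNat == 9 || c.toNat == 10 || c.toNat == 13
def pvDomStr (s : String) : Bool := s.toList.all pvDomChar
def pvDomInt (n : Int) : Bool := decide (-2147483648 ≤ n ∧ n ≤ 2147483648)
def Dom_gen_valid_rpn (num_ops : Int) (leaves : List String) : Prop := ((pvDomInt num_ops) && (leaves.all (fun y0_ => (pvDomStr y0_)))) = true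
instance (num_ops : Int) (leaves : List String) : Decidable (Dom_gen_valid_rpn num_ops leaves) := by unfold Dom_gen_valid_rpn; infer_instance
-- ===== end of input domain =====

-- B replaces A's recursive backtracking generator (ops/leaves counters, shared mutable
-- buffer) by an iterative level-by-level frontier over token positions with a
-- depth/parity feasibility prune; objective: alternative (same enumeration, same cost).


-- ===== PORT A =====
-- the inner generator `_gen`: buf is passed explicitly (Python mutates a shared buffer;
-- the yielded tuples are `buf` snapshots, modelled by the accumulated prefix)
def genA (leaves : List String) (buf : List String) (depth opsLeft leavesLeft : Int) :
    List (List String) :=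
  if ¬ (depth - opsLeft ≤ 1 ∧ 1 ≤ depth + leavesLeft) then []
  else if opsLeft = 0 ∧ leavesLeft = 0 then
    (if depth = 1 then [buf] else [])
  else
    (if hl : 0 < leavesLeft then
      leaves.flatMap (fun leaf => genA leaves (buf ++ [leaf]) (depth + 1) opsLeft (leavesLeft - 1))
    else []) ++
    (if ho : 0 < opsLeft ∧ 2 ≤ depth then
      genA leaves (buf ++ ["E"]) (depth - 1) (opsLeft - 1) leavesLeft
    else [])
termination_by opsLeft.toNat + leavesLeft.toNat
decreasing_by
  · omega
  · omega

def gen_valid_rpn (num_ops : Int) (leaves : List String) : List (List String) :=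
  genA leaves [] 0 num_ops (num_ops + 1)

-- ===== PORT B =====
-- _feasible(d, r)
def feasibleB (d r : Int) : Bool :=
  (d - 1 ≤ r) && ((r - d + 1) % 2 == 0)

-- one level of the frontier loop (body of `for prefix, d in frontier`)
def stepB (leaves : List String) (r : Int) (frontier : List (List String × Int)) :
    List (List String × Int) :=
  frontier.flatMap (fun pd =>
    (if feasibleB (pd.2 + 1) r then leaves.map (fun leaf => (pd.1 ++ [leaf], pd.2 + 1)) else []) ++
    (if 2 ≤ pd.2 ∧ feasibleB (pd.2 - 1) r then [(pd.1 ++ ["E"], pd.2 - 1)] else []))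

def gen_valid_rpn_alt (num_ops : Int) (leaves : List String) : List (List String) :=
  if num_ops < 0 then []
  else
    let L : Nat := (2 * num_ops + 1).toNat
    let frontier :=
      (List.range L).foldl (fun fr (i : Nat) => stepB leaves ((L : Int) - 1 - (i : Int)) fr)
        [(([] : List String), (0 : Int))]
    (frontier.filter (fun pd => pd.2 == 1)).map Prod.fst

-- ===== PRECONDITION & SPEC =====
-- Pre_ excludes only inputs with nonempty leaves and num_ops > 490, on which CPython's A
-- raises RecursionError: consuming the generator recurses to depth 2*num_ops+2 and the
-- measured crash boundary on this interpreter is num_ops = 498 (490 leaves a small safety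
-- margin because the exact limit depends on frames already on the stack); with leaves = []
-- A never recurses and always returns.
def Pre_gen_valid_rpn (num_ops : Int) (leaves : List String) : Prop :=
  leaves = [] ∨ num_ops ≤ 490
instance (num_ops : Int) (leaves : List String) : Decidable (Pre_gen_valid_rpn num_ops leaves) := by unfold Pre_gen_valid_rpn; infer_instance
def pvWitness_gen_valid_rpn : Int × List String := (2, ["a", "b"])

def Spec_gen_valid_rpn (num_ops : Int) (leaves : List String) (out : List (List String)) : Prop := out = gen_valid_rpn_alt num_ops leaves
instance (num_ops : Int) (leaves : List String) (out : List (List String)) : Decidable (Spec_gen_valid_rpn num_ops leaves out) := by unfold Spec_gen_valid_rpn; infer_instance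

-- ===== CLAIM (what is proved, stated in full; the proofs are below) =====
def Claim_equal_gen_valid_rpn : Prop := ∀ (num_ops : Int) (leaves : List String), Dom_gen_valid_rpn num_ops leaves → Pre_gen_valid_rpn num_ops leaves → Spec_gen_valid_rpn num_ops leaves (gen_valid_rpn num_ops leaves)

-- ===== LEMMAS AND PROOFS =====

-- proof bridge: valid completions of length r from depth d, in the shared order
def genR (leaves : List String) : Nat → Int → List (List String)
  | 0, d => if d = 1 then [[]] else []
  | r + 1, d =>
    (if feasibleB (d + 1) (r : Int) then
      leaves.flatMap (fun leaf => (genR leaves r (d + 1)).map (fun t => leaf :: t))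
    else []) ++
    (if 2 ≤ d ∧ feasibleB (d - 1) (r : Int) then
      (genR leaves r (d - 1)).map (fun t => "E" :: t)
    else [])

-- the descending level loop
def runB (leaves : List String) : Nat → List (List String × Int) → List (List String × Int)
  | 0, fr => fr
  | r + 1, fr => runB leaves r (stepB leaves (r : Int) fr)

theorem feasibleB_iff (d r : Int) : feasibleB d r = true ↔ (d - 1 ≤ r ∧ (r - d + 1) % 2 = 0) := by
  simp [feasibleB]

theorem genA_eq_genR (leaves : List String) :
    ∀ (r : Nat) (ol ll d : Int) (buf : List String), 0 ≤ ol → 0 ≤ ll →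
      (ol + ll).toNat = r → d = 1 + ol - ll →
      genA leaves buf d ol ll = (genR leaves r d).map (fun t => buf ++ t) := by
  intro r
  induction r with
  | zero =>
    intro ol ll d buf hol hll hr hd
    have h0 : ol = 0 ∧ ll = 0 := by omega
    rw [genA]
    simp [genR, h0.1, h0.2, hd]
  | succ r ih =>
    intro ol ll d buf hol hll hr hd
    rw [genA]
    rw [if_neg (by omega)]
    rw [if_neg (by omega)]
    have hleaf : (0 < ll) ↔ (feasibleB (d + 1) (r : Int) = true) := by
      rw [feasibleB_iff]; omega
    have hop : (0 < ol ∧ 2 ≤ d) ↔ (2 ≤ d ∧ feasibleB (d - 1) (r : Int) = true) := by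
      rw [feasibleB_iff]; omega
    show _ = (genR leaves (r + 1) d).map _
    rw [genR]
    rw [List.map_append]
    congr 1
    · by_cases hl : 0 < ll
      · rw [dif_pos hl, if_pos (hleaf.mp hl)]
        rw [List.map_flatMap]
        refine List.flatMap_congr (fun leaf _ => ?_)
        rw [ih ol (ll - 1) (d + 1) (buf ++ [leaf]) (by omega) (by omega) (by omega) (by omega)]
        rw [List.map_map]
        refine List.map_congr_left (fun t _ => ?_)
        simp
      · rw [dif_neg hl, if_neg (fun h => hl (hleaf.mpr h))]
        simp
    · by_cases ho : 0 < ol ∧ 2 ≤ d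
      · rw [dif_pos ho, if_pos (hop.mp ho)]
        rw [ih (ol - 1) ll (d - 1) (buf ++ ["E"]) (by omega) (by omega) (by omega) (by omega)]
        rw [List.map_map]
        refine List.map_congr_left (fun t _ => ?_)
        simp
      · rw [dif_neg ho, if_neg (fun h => ho (hop.mpr h))]
        simp

theorem runB_eq_genR (leaves : List String) :
    ∀ (r : Nat) (fr : List (List String × Int)),
      ((runB leaves r fr).filter (fun pd => pd.2 == 1)).map Prod.fst =
        fr.flatMap (fun pd => (genR leaves r pd.2).map (fun t => pd.1 ++ t)) := by
  intro r
  induction r with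
  | zero =>
    intro fr
    induction fr with
    | nil => simp [runB]
    | cons pd fr ihf =>
      rw [runB] at ihf ⊢
      by_cases h : pd.2 = 1 <;>
        simp [List.flatMap_cons, h, genR, ihf]
  | succ r ih =>
    intro fr
    rw [runB, ih]
    rw [stepB, List.flatMap_assoc]
    refine List.flatMap_congr (fun pd _ => ?_)
    rw [genR, List.map_append, List.flatMap_append]
    congr 1
    · by_cases h : feasibleB (pd.2 + 1) (r : Int) = true
      · rw [if_pos h, if_pos h, List.flatMap_map, List.map_flatMap]
        refine List.flatMap_congr (fun leaf _ => ?_)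
        rw [List.map_map]
        refine List.map_congr_left (fun t _ => ?_)
        simp
      · rw [if_neg h, if_neg h]; simp
    · by_cases h : 2 ≤ pd.2 ∧ feasibleB (pd.2 - 1) (r : Int) = true
      · rw [if_pos h, if_pos h]
        rw [List.flatMap_cons, List.flatMap_nil, List.append_nil, List.map_map]
        refine List.map_congr_left (fun t _ => ?_)
        simp
      · rw [if_neg h, if_neg h]; simp

theorem foldl_range_eq_runB (leaves : List String) :
    ∀ (n : Nat) (fr : List (List String × Int)),
      (List.range n).foldl (fun f (i : Nat) => stepB leaves ((n : Int) - 1 - (i : Int)) f) fr =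
        runB leaves n fr := by
  intro n
  induction n with
  | zero => intro fr; simp [runB]
  | succ n ih =>
    intro fr
    rw [List.range_succ_eq_map, List.foldl_cons, List.foldl_map]
    rw [runB]
    have h1 : ((n + 1 : Nat) : Int) - 1 - ((0 : Nat) : Int) = (n : Int) := by push_cast; ring
    rw [h1]
    have h2 : (fun (f : List (List String × Int)) (i : Nat) =>
        stepB leaves (((n + 1 : Nat) : Int) - 1 - ((i + 1 : Nat) : Int)) f) =
        (fun f (i : Nat) => stepB leaves ((n : Int) - 1 - (i : Int)) f) := by
      funext f i; congr 1; push_cast; ring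
    rw [h2, ih]

-- ===== VERDICT (by name: the statement is the Claim_ definition above) =====
theorem gen_valid_rpn_spec : Claim_equal_gen_valid_rpn := by
  intro num_ops leaves _ _
  unfold Spec_gen_valid_rpn gen_valid_rpn gen_valid_rpn_alt
  by_cases hneg : num_ops < 0
  · rw [if_pos hneg, genA, if_pos (by omega)]
  · rw [if_neg hneg]
    have hn : 0 ≤ num_ops := by omega
    simp only []
    rw [foldl_range_eq_runB, runB_eq_genR]
    rw [genA_eq_genR leaves (2 * num_ops + 1).toNat num_ops (num_ops + 1) 0 []
      (by omega) (by omega) (by omega) (by omega)]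
    simp
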